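-- pv_equiv track=rewrite | github.com/Jalen-Chen/Tag_Generator | tag_generator.py | order_dic
-- ===== SOURCE A (Python) =====
-- def get_level(tag:str):
--     return tag.count("/")
--
-- def get_front(tag:str) -> str:
--     '''
--     Get the front tag
--     '''
--     for i in range (len(tag)-1, -1,-1):
--         if tag[i] == '/':
--             return tag[:i]
--
--     return "Nfound"
--
-- def order_dic(dic:dict):
--     '''
--     this will return a dictionary which is ordered by its tag.
--     '''
--     list_keys = []
--     for elem in dic.keys():
--         list_keys.append(elem)
--     result = []
--     no_front = []
--     #order the tags
--     for elem in sorted(list_keys, key = get_level):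
--         front = get_front(elem)
--         if get_level(elem) == 0:
--             result.append(elem)
--         elif front in result:
--             position = result.index(front)
--             result.insert(position+1, elem)
--         else:
--             no_front.append(elem)
--
--     # add no front into the final result list
--     for elem in no_front:
--         result.append(elem)
--     return result
-- ===== SOURCE B (Python) =====
-- def order_dic(dic: dict):
--     '''
--     Same result as the original, via a successor-map (linked-list) splice:
--     sort keys by depth once, chain the roots, splice each placed tag
--     right after its parent in the successor map, then walk the chain once.
--     '''
--     keys = sorted(dic, key=lambda k: k.count("/"))
--     roots = [k for k in keys if k.count("/") == 0]
--     nxt = dict(zip(roots, roots[1:]))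
--     placed = set(roots)
--     no_front = []
--     for k in keys:
--         if k.count("/") > 0:
--             p = k[:k.rfind("/")]
--             if p in placed:
--                 nxt[k] = nxt.get(p)
--                 nxt[p] = k
--                 placed.add(k)
--             else:
--                 no_front.append(k)
--     result = []
--     t = roots[0] if roots else None
--     while t is not None:
--         result.append(t)
--         t = nxt.get(t)
--     result.extend(no_front)
--     return result
-- ===== Notes on version B (the rewrite author's own statement) =====
-- stated objective: alternative
-- what changed: A re-scans the growing result list for every tag (membership test, list.index and a mid-list insert); B sorts the keys once by depth, splices each placed tag directly after its parent in a successor map (linked-list representation), walks the chain once at the end, and collects unplaced tags in the same level-sorted order.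
import Mathlib
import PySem

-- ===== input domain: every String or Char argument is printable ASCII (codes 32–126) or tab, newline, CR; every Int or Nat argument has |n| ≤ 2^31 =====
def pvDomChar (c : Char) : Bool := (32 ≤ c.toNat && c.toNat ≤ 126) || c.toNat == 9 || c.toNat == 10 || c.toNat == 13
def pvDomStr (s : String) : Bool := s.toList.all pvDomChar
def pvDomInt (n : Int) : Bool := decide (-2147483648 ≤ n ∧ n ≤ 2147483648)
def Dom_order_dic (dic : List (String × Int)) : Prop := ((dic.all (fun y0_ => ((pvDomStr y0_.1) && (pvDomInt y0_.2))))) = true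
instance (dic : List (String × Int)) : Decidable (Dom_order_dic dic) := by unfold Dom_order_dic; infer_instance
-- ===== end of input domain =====

-- ===== PORT A =====
-- B replaces A's repeated result-list scans (membership, list.index, mid-list insert) by a successor-map
-- (linked-list) splice plus one final chain walk; same return value on every input.
-- A-side helpers (literal transliteration of the Python)
def get_level (tag : String) : Int := (PySem.Str.count tag "/" : Int)

def get_front_go (tag : String) : List Int → String
  | [] => "Nfound"
  | i :: rest =>
    if PySem.Str.pyGet? tag i = some '/' then PySem.Str.slice tag none (some i)
    else get_front_go tag rest

def get_front (tag : String) : String :=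
  get_front_go tag (PySem.List.pyRange (PySem.Str.len tag - 1) (-1) (-1))

-- one iteration of A's main loop (state: result, no_front)
def stepA (st : List String × List String) (elem : String) : List String × List String :=
  let front := get_front elem
  if get_level elem = 0 then (st.1 ++ [elem], st.2)
  else if st.1.contains front then
    match PySem.List.index? st.1 front with
    | some position => (PySem.List.insert st.1 ((position : Int) + 1) elem, st.2)
    | none => st   -- unreachable: guarded by `front in result`
  else (st.1, st.2 ++ [elem])

def order_dic (dic : List (String × Int)) : List String :=
  let list_keys := (PySem.Dict.ofList dic).keys.foldl (fun acc e => acc ++ [e]) []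
  let st := (PySem.List.sorted list_keys get_level).foldl stepA ([], [])
  st.2.foldl (fun acc e => acc ++ [e]) st.1

-- ===== PORT B =====
-- one iteration of B's loop (state: nxt successor map, placed set, no_front)
def stepB (st : PySem.Dict String (Option String) × PySem.Set String × List String)
    (k : String) : PySem.Dict String (Option String) × PySem.Set String × List String :=
  if 0 < PySem.Str.count k "/" then
    let p := PySem.Str.slice k none (some (PySem.Str.rfind k "/"))
    if st.2.1.contains p then
      ((st.1.insert k (st.1.getD p none)).insert p (some k), st.2.1.add k, st.2.2)
    else (st.1, st.2.1, st.2.2 ++ [k])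
  else st

-- the final `while t is not None` walk; the fuel `keys.length` is a totality guard only:
-- the chain visits pairwise-distinct keys, so it is never exhausted
def walkChain (nxt : PySem.Dict String (Option String)) : Nat → Option String → List String
  | 0, _ => []
  | _ + 1, none => []
  | fuel + 1, some t => t :: walkChain nxt fuel (nxt.getD t none)

def order_dic_alt (dic : List (String × Int)) : List String :=
  let keys := PySem.List.sorted (PySem.Dict.ofList dic).keys (fun k => (PySem.Str.count k "/" : Int))
  let roots := keys.filter (fun k => PySem.Str.count k "/" == 0)
  let nxt0 := (roots.zip (PySem.List.slice roots (some 1) none)).foldl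
      (fun (d : PySem.Dict String (Option String)) pr => d.insert pr.1 (some pr.2)) PySem.Dict.empty
  let st := keys.foldl stepB (nxt0, PySem.Set.ofList roots, [])
  walkChain st.1 keys.length roots.head? ++ st.2.2

-- ===== PRECONDITION & SPEC =====
def Spec_order_dic (dic : List (String × Int)) (out : List String) : Prop := out = order_dic_alt dic
instance (dic : List (String × Int)) (out : List String) : Decidable (Spec_order_dic dic out) := by unfold Spec_order_dic; infer_instance

-- ===== CLAIM (what is proved, stated in full; the proofs are below) =====
def Claim_equal_order_dic : Prop := ∀ (dic : List (String × Int)), Dom_order_dic dic → Spec_order_dic dic (order_dic dic)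

-- ===== LEMMAS AND PROOFS =====

-- `Chain nxt s l`: starting from `s` and following the successor map `nxt`, one visits exactly `l` and then stops
def ChainP (nxt : PySem.Dict String (Option String)) : Option String → List String → Prop
  | s, [] => s = none
  | s, a :: tl => s = some a ∧ ChainP nxt (nxt.getD a none) tl

lemma chain_getD_congr (nxt nxt' : PySem.Dict String (Option String)) (s : Option String)
    (l : List String) (h : ∀ a ∈ l, nxt'.getD a none = nxt.getD a none)
    (hc : ChainP nxt s l) : ChainP nxt' s l := by
  induction l generalizing s with
  | nil => exact hc
  | cons a tl ih =>
    obtain ⟨hs, hrest⟩ := hc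
    refine ⟨hs, ?_⟩
    rw [h a (List.mem_cons_self)]
    exact ih _ (fun b hb => h b (List.mem_cons_of_mem _ hb)) hrest

lemma chain_insert (nxt : PySem.Dict String (Option String)) (start : Option String)
    (pre post : List String) (p x : String)
    (hch : ChainP nxt start (pre ++ p :: post)) (hnd : (pre ++ p :: post).Nodup)
    (hx : x ∉ pre ++ p :: post) :
    ChainP ((nxt.insert x (nxt.getD p none)).insert p (some x)) start (pre ++ p :: x :: post) := by
  have hpx : p ≠ x := fun hpx => hx (by simp [← hpx])
  induction pre generalizing start with
  | nil =>
    obtain ⟨hs, hrest⟩ := hch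
    refine ⟨hs, ?_⟩
    rw [PySem.Dict.getD_insert]
    rw [if_pos rfl]
    refine ⟨rfl, ?_⟩
    rw [PySem.Dict.getD_insert, if_neg (Ne.symm hpx), PySem.Dict.getD_insert_self]
    refine chain_getD_congr nxt _ _ post (fun a ha => ?_) hrest
    have hap : a ≠ p := by
      have := hnd
      simp only [List.nil_append, List.nodup_cons] at this
      exact fun hap => this.1 (hap ▸ ha)
    have hax : a ≠ x := fun hax => hx (by simp [← hax, ha])
    rw [PySem.Dict.getD_insert, if_neg hap, PySem.Dict.getD_insert, if_neg hax]
  | cons a pre ih =>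
    obtain ⟨hs, hrest⟩ := hch
    refine ⟨hs, ?_⟩
    have hap : a ≠ p := by
      simp only [List.cons_append, List.nodup_cons] at hnd
      exact fun hap => hnd.1 (by simp [hap])
    have hax : a ≠ x := fun hax => hx (by simp [← hax])
    rw [PySem.Dict.getD_insert, if_neg hap, PySem.Dict.getD_insert, if_neg hax]
    exact ih _ hrest (by simpa using (List.nodup_cons.mp (by simpa using hnd)).2)
      (fun hmem => hx (List.mem_cons_of_mem _ hmem))

lemma walk_of_chain (nxt : PySem.Dict String (Option String)) (s : Option String)
    (l : List String) (hc : ChainP nxt s l) :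
    ∀ fuel, l.length ≤ fuel → walkChain nxt fuel s = l := by
  induction l generalizing s with
  | nil =>
    intro fuel _
    have hs : s = none := hc
    subst hs
    cases fuel <;> rfl
  | cons a tl ih =>
    intro fuel hf
    obtain ⟨hs, hrest⟩ := hc
    subst hs
    cases fuel with
    | zero => simp at hf
    | succ fuel =>
      simp only [walkChain, List.cons.injEq, true_and]
      exact ih _ hrest fuel (by simpa using hf)

lemma zip_tail_fst (l : List String) : (l.zip l.tail).map Prod.fst = l.dropLast := by
  induction l with
  | nil => rfl
  | cons a t ih =>
    cases t with
    | nil => rfl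
    | cons b t' => simpa using ih

lemma zip_tail_mem (x b : String) : ∀ (pre : List String) (post : List String),
    (x, b) ∈ (pre ++ x :: b :: post).zip (pre ++ x :: b :: post).tail := by
  intro pre post
  induction pre with
  | nil => simp [List.zip_cons_cons]
  | cons a pre ih =>
    cases hm : pre ++ x :: b :: post with
    | nil => simp at hm
    | cons c rest =>
      simp only [List.cons_append, List.tail_cons]
      rw [hm, List.zip_cons_cons]
      refine List.mem_cons_of_mem _ ?_
      show (x, b) ∈ (c :: rest).zip (c :: rest).tail
      rw [← hm]
      exact ih

lemma nxt0_getD (l : List String) (hnd : l.Nodup) (pre post : List String) (x : String)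
    (h : l = pre ++ x :: post) :
    ((l.zip l.tail).foldl (fun d pr => d.insert pr.1 (some pr.2)) PySem.Dict.empty).getD x none
      = post.head? := by
  have hfresh : ∀ pr ∈ l.zip l.tail,
      (PySem.Dict.empty : PySem.Dict String (Option String)).contains pr.1 = false :=
    fun pr _ => PySem.Dict.contains_empty pr.1
  have hkeysnd : ((l.zip l.tail).map Prod.fst).Nodup := by
    rw [zip_tail_fst]; exact hnd.sublist (List.dropLast_sublist l)
  have hitems := PySem.Dict.items_foldl_insert_fresh (l.zip l.tail) Prod.fst
    (fun pr => some pr.2) PySem.Dict.empty hfresh hkeysnd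
  have hkeys : ((l.zip l.tail).foldl (fun d pr => d.insert pr.1 (some pr.2))
      PySem.Dict.empty).keys = l.dropLast := by
    show (((l.zip l.tail).foldl (fun d pr => d.insert pr.1 (some pr.2))
      PySem.Dict.empty).items).map Prod.fst = l.dropLast
    rw [hitems, show (PySem.Dict.empty : PySem.Dict String (Option String)).items = [] from rfl,
      List.nil_append, List.map_map]
    exact zip_tail_fst l
  have hkeysnd' : ((l.zip l.tail).foldl (fun d pr => d.insert pr.1 (some pr.2))
      PySem.Dict.empty).keys.Nodup := by
    rw [hkeys]; exact hnd.sublist (List.dropLast_sublist l)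
  cases post with
  | nil =>
    have hxpre : x ∉ pre := by
      rw [h] at hnd
      intro hxp
      exact List.disjoint_of_nodup_append hnd hxp (List.mem_cons_self)
    have hxk : x ∉ ((l.zip l.tail).foldl (fun d pr => d.insert pr.1 (some pr.2))
        PySem.Dict.empty).keys := by
      rw [hkeys, h]
      rw [show pre ++ [x] = pre ++ [x] from rfl, List.dropLast_concat]
      exact hxpre
    rw [PySem.Dict.getD_eq_get?_getD,
      (PySem.Dict.get?_eq_none_iff_not_mem_keys _ _).mpr hxk]
    rfl
  | cons b post' =>
    have hmem : (x, some b) ∈ ((l.zip l.tail).foldl (fun d pr => d.insert pr.1 (some pr.2))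
        PySem.Dict.empty).items := by
      rw [hitems, show (PySem.Dict.empty : PySem.Dict String (Option String)).items = [] from rfl,
        List.nil_append]
      exact List.mem_map.mpr ⟨(x, b), by rw [h]; exact zip_tail_mem x b pre post', rfl⟩
    rw [PySem.Dict.getD_of_mem_items _ hmem hkeysnd']
    rfl

lemma chain_of_succ (nxt : PySem.Dict String (Option String)) :
    ∀ (l : List String), (∀ pre x post, l = pre ++ x :: post → nxt.getD x none = post.head?) →
    ChainP nxt l.head? l := by
  intro l
  induction l with
  | nil => intro _; exact rfl
  | cons a tl ih =>
    intro H
    refine ⟨rfl, ?_⟩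
    rw [H [] a tl rfl]
    exact ih (fun pre x post hp => H (a :: pre) x post (by rw [hp]; rfl))

lemma chain_nxt0 (l : List String) (hnd : l.Nodup) :
    ChainP ((l.zip l.tail).foldl (fun d pr => d.insert pr.1 (some pr.2)) PySem.Dict.empty)
      l.head? l := by
  exact chain_of_succ _ l (fun pre x post hp => nxt0_getD l hnd pre post x hp)

lemma count_go_zero (cs : List Char) (fuel acc : Nat) (h : '/' ∉ cs) :
    PySem.Chars.count.go ['/'] fuel cs acc = acc := by
  induction fuel generalizing cs acc with
  | zero => rfl
  | succ fuel ih =>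
    cases cs with
    | nil => rfl
    | cons c t =>
      have hc : c ≠ '/' := fun hc => h (by simp [hc])
      have ht : '/' ∉ t := fun hm => h (List.mem_cons_of_mem _ hm)
      have hpre : (['/'] : List Char).isPrefixOf (c :: t) = false := by
        simp [List.isPrefixOf]
        exact fun h' => hc h'.symm
      simp only [PySem.Chars.count.go, hpre]
      exact ih t acc ht

lemma slash_mem_of_count_ne (s : String) (h : PySem.Str.count s "/" ≠ 0) : '/' ∈ s.toList := by
  by_contra hmem
  apply h
  have : PySem.Str.count s "/" = PySem.Chars.count s.toList "/".toList := by
    simp [PySem.Str.count_eq]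
  rw [this]
  show PySem.Chars.count s.toList ['/'] = 0
  rw [PySem.Chars.count]
  simp only [List.isEmpty_cons, if_false, Bool.false_eq_true]
  exact count_go_zero _ _ _ hmem

lemma last_decomp (c : Char) : ∀ (l : List Char), c ∈ l → ∃ t u, l = t ++ c :: u ∧ c ∉ u := by
  intro l
  induction l with
  | nil => intro h; simp at h
  | cons a tl ih =>
    intro h
    by_cases hm : c ∈ tl
    · obtain ⟨t, u, ht, hu⟩ := ih hm
      exact ⟨a :: t, u, by simp [ht], hu⟩
    · have hca : c = a := by
        rcases List.mem_cons.mp h with h1 | h2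
        · exact h1
        · exact absurd h2 hm
      exact ⟨[], tl, by simp [hca], hm⟩

lemma rfind_go_aux (t u : List Char) (hu : '/' ∉ u) :
    ∀ m, t.length ≤ m → m ≤ t.length + 1 + u.length →
    PySem.Chars.rfind.go (t ++ '/' :: u) ['/'] m = (t.length : Int) := by
  intro m
  induction m with
  | zero =>
    intro h1 _
    have ht : t = [] := List.eq_nil_of_length_eq_zero (Nat.le_zero.mp h1)
    subst ht
    simp [PySem.Chars.rfind.go, List.isPrefixOf]
  | succ j ih =>
    intro h1 h2
    by_cases hj : j + 1 = t.length
    · have hdrop : List.drop (j + 1) (t ++ '/' :: u) = '/' :: u := by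
        rw [hj]; exact List.drop_left
      simp [PySem.Chars.rfind.go, List.isPrefixOf, hj]
    · have hlt : t.length ≤ j := by omega
      have hdrop : List.drop (j + 1) (t ++ '/' :: u) = List.drop (j - t.length) u := by
        rw [List.drop_append, List.drop_of_length_le (by omega)]
        have : j + 1 - t.length = (j - t.length) + 1 := by omega
        rw [this]
        rfl
      have hpre : (['/'] : List Char).isPrefixOf (List.drop (j - t.length) u) = false := by
        cases hD : List.drop (j - t.length) u with
        | nil => rfl
        | cons c w =>
          have hcu : c ∈ u := List.mem_of_mem_drop (by rw [hD]; exact List.mem_cons_self)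
          have : c ≠ '/' := fun hc => hu (hc ▸ hcu)
          simp [List.isPrefixOf]
          exact fun hc => this hc.symm
      have e : PySem.Chars.rfind.go (t ++ '/' :: u) ['/'] (j + 1)
          = PySem.Chars.rfind.go (t ++ '/' :: u) ['/'] j := by
        simp [PySem.Chars.rfind.go, hdrop, hpre]
      rw [e]
      exact ih hlt (by omega)

lemma rfind_last (s : String) (t u : List Char) (h : s.toList = t ++ '/' :: u) (hu : '/' ∉ u) :
    PySem.Str.rfind s "/" = (t.length : Int) := by
  rw [PySem.Str.rfind_eq, h]
  show PySem.Chars.rfind (t ++ '/' :: u) ['/'] = (t.length : Int)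
  rw [PySem.Chars.rfind]
  exact rfind_go_aux t u hu _ (by simp) (by simp; omega)

lemma get_front_go_aux (s : String) (t u : List Char) (h : s.toList = t ++ '/' :: u)
    (hu : '/' ∉ u) :
    ∀ d : Nat, d ≤ u.length →
    get_front_go s (PySem.List.pyRange ((t.length + d : Nat) : Int) (-1) (-1))
      = PySem.Str.slice s none (some (t.length : Int)) := by
  intro d
  induction d with
  | zero =>
    intro _
    rw [PySem.List.pyRange_neg_one_cons (by push_cast; omega)]
    have hget : s.toList[t.length]? = some '/' := by
      rw [h, List.getElem?_append_right (le_refl _)]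
      simp
    simp [get_front_go, hget]
  | succ e ih =>
    intro hd
    rw [PySem.List.pyRange_neg_one_cons (by push_cast; omega)]
    have he : e < u.length := by omega
    have hget : PySem.Str.pyGet? s ((t.length + (e + 1) : Nat) : Int) = some u[e] := by
      rw [PySem.Str.pyGet?_natCast, h]
      rw [List.getElem?_append_right (by omega)]
      have : t.length + (e + 1) - t.length = e + 1 := by omega
      rw [this]
      simp [he]
    have hne : ¬ (PySem.Str.pyGet? s ((t.length + (e + 1) : Nat) : Int) = some '/') := by
      rw [hget]
      intro hco
      have : u[e] = '/' := by injection hco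
      exact hu (this ▸ List.getElem_mem he)
    simp only [get_front_go, if_neg hne]
    have harg : ((t.length + (e + 1) : Nat) : Int) - 1 = ((t.length + e : Nat) : Int) := by
      push_cast; ring
    rw [harg]
    exact ih (by omega)

lemma get_front_char (s : String) (t u : List Char) (h : s.toList = t ++ '/' :: u)
    (hu : '/' ∉ u) : get_front s = PySem.Str.slice s none (some (t.length : Int)) := by
  unfold get_front
  have hlen : PySem.Str.len s - 1 = ((t.length + u.length : Nat) : Int) := by
    rw [PySem.Str.len_eq, h]
    simp
    ring
  rw [hlen]
  exact get_front_go_aux s t u h hu u.length (le_refl _)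

lemma front_eq (s : String) (h : PySem.Str.count s "/" ≠ 0) :
    get_front s = PySem.Str.slice s none (some (PySem.Str.rfind s "/")) := by
  obtain ⟨t, u, hdec, hu⟩ := last_decomp '/' s.toList (slash_mem_of_count_ne s h)
  rw [get_front_char s t u hdec hu, rfind_last s t u hdec hu]

lemma stepA_zero (st : List String × List String) (x : String) (h : PySem.Str.count x "/" = 0) :
    stepA st x = (st.1 ++ [x], st.2) := by
  have h' : PySem.Chars.count x.toList ['/'] = 0 := by
    simpa [PySem.Str.count_eq] using h
  simp [stepA, get_level, h']

lemma foldl_stepA_zeros (S0 : List String) (h : ∀ x ∈ S0, PySem.Str.count x "/" = 0) :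
    ∀ st : List String × List String, S0.foldl stepA st = (st.1 ++ S0, st.2) := by
  induction S0 with
  | nil => intro st; simp
  | cons a t ih =>
    intro st
    rw [List.foldl_cons, stepA_zero st a (h a (List.mem_cons_self)),
      ih (fun x hx => h x (List.mem_cons_of_mem _ hx))]
    simp

lemma foldl_stepB_zeros (S0 : List String) (h : ∀ x ∈ S0, PySem.Str.count x "/" = 0)
    (st : PySem.Dict String (Option String) × PySem.Set String × List String) :
    S0.foldl stepB st = st := by
  induction S0 generalizing st with
  | nil => rfl
  | cons a t ih =>
    rw [List.foldl_cons, show stepB st a = st by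
      have h' : PySem.Chars.count a.toList ['/'] = 0 := by
        simpa [PySem.Str.count_eq] using h a (List.mem_cons_self)
      simp [stepB, h']]
    exact ih (fun x hx => h x (List.mem_cons_of_mem _ hx)) st

lemma main_inv : ∀ (Q r nfA : List String) (nxt : PySem.Dict String (Option String))
    (pl : PySem.Set String) (start : Option String),
    ChainP nxt start r → r.Nodup →
    (∀ k, pl.contains k = true ↔ k ∈ r) →
    Q.Nodup → (∀ x ∈ Q, x ∉ r) → (∀ x ∈ Q, PySem.Str.count x "/" ≠ 0) →
    ChainP (Q.foldl stepB (nxt, pl, nfA)).1 start (Q.foldl stepA (r, nfA)).1 ∧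
    (Q.foldl stepA (r, nfA)).1.Nodup ∧
    (∀ k, (Q.foldl stepB (nxt, pl, nfA)).2.1.contains k = true ↔ k ∈ (Q.foldl stepA (r, nfA)).1) ∧
    (Q.foldl stepA (r, nfA)).2 = (Q.foldl stepB (nxt, pl, nfA)).2.2 ∧
    (∀ k ∈ (Q.foldl stepA (r, nfA)).1, k ∈ r ∨ k ∈ Q) := by
  intro Q
  induction Q with
  | nil =>
    intro r nfA nxt pl start hch hnd hpl _ _ _
    exact ⟨hch, hnd, hpl, rfl, fun k hk => Or.inl hk⟩
  | cons x Q ih =>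
    intro r nfA nxt pl start hch hnd hpl hQnd hfresh hcnt
    have hcx : PySem.Str.count x "/" ≠ 0 := hcnt x (List.mem_cons_self)
    have hxr : x ∉ r := hfresh x (List.mem_cons_self)
    have hQnd' : Q.Nodup := (List.nodup_cons.mp hQnd).2
    have hxQ : x ∉ Q := (List.nodup_cons.mp hQnd).1
    have hfr : get_front x = PySem.Str.slice x none (some (PySem.Str.rfind x "/")) :=
      front_eq x hcx
    set p := PySem.Str.slice x none (some (PySem.Str.rfind x "/")) with hp
    have hlvl : ¬ (get_level x = 0) := by
      simp only [get_level, Int.natCast_eq_zero]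
      exact hcx
    have hcount : 0 < PySem.Str.count x "/" := Nat.pos_of_ne_zero hcx
    simp only [List.foldl_cons]
    by_cases hmem : p ∈ r
    · -- parent already placed: A inserts after it, B splices the successor map
      obtain ⟨i, hi⟩ := Option.isSome_iff_exists.mp
        ((PySem.List.index?_isSome_iff r p).mpr hmem)
      obtain ⟨pre, suf, hr, hlen, hnpre⟩ := (PySem.List.index?_eq_some_iff r p i).mp hi
      have hsA : stepA (r, nfA) x = (pre ++ p :: x :: suf, nfA) := by
        simp only [stepA, if_neg hlvl, hfr]
        rw [if_pos (show r.contains p = true from List.elem_eq_true_of_mem hmem)]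
        rw [hi]
        show (PySem.List.insert r ((i : Int) + 1) x, nfA) = (pre ++ p :: x :: suf, nfA)
        have hc1 : ((i : Int) + 1) = (((i + 1 : Nat)) : Int) := by push_cast; ring
        rw [hc1, PySem.List.insert_natCast r (i + 1) x (by rw [hr]; simp; omega)]
        rw [hr, show pre ++ p :: suf = (pre ++ [p]) ++ suf by simp,
          List.take_left' (by simp; omega), List.drop_left' (by simp; omega)]
        simp
      have hsB : stepB (nxt, pl, nfA) x
          = ((nxt.insert x (nxt.getD p none)).insert p (some x), pl.add x, nfA) := by
        simp only [stepB, if_pos hcount]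
        rw [if_pos ((hpl p).mpr hmem)]
      rw [hsA, hsB]
      have hperm : (pre ++ p :: x :: suf).Perm (x :: r) := by
        rw [hr, show pre ++ p :: x :: suf = (pre ++ [p]) ++ x :: suf by simp,
          show pre ++ p :: suf = (pre ++ [p]) ++ suf by simp]
        exact List.perm_middle
      have hnd' : (pre ++ p :: x :: suf).Nodup :=
        hperm.nodup_iff.mpr (List.nodup_cons.mpr ⟨hxr, hnd⟩)
      have hch' : ChainP ((nxt.insert x (nxt.getD p none)).insert p (some x)) start
          (pre ++ p :: x :: suf) :=
        chain_insert nxt start pre suf p x (hr ▸ hch) (hr ▸ hnd) (hr ▸ hxr)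
      have hpl' : ∀ k, (pl.add x).contains k = true ↔ k ∈ pre ++ p :: x :: suf := by
        intro k
        rw [PySem.Set.contains_iff, PySem.Set.mem_add, hperm.mem_iff, List.mem_cons]
        rw [← hpl k, PySem.Set.contains_iff]
        tauto
      have hfresh' : ∀ y ∈ Q, y ∉ pre ++ p :: x :: suf := by
        intro y hy hymem
        rcases List.mem_cons.mp (hperm.mem_iff.mp hymem) with h1 | h2
        · exact hxQ (h1 ▸ hy)
        · exact hfresh y (List.mem_cons_of_mem _ hy) h2
      obtain ⟨c1, c2, c3, c4, c5⟩ := ih (pre ++ p :: x :: suf) nfA _ (pl.add x) start hch' hnd'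
        hpl' hQnd' hfresh' (fun y hy => hcnt y (List.mem_cons_of_mem _ hy))
      refine ⟨c1, c2, c3, c4, fun k hk => ?_⟩
      rcases c5 k hk with h1 | h2
      · rcases List.mem_cons.mp (hperm.mem_iff.mp h1) with h3 | h4
        · exact Or.inr (h3 ▸ List.mem_cons_self)
        · exact Or.inl h4
      · exact Or.inr (List.mem_cons_of_mem _ h2)
    · -- parent not placed: both sides append to no_front
      have hcontp : r.contains p = false := by
        cases hb : r.contains p with
        | false => rfl
        | true => exact absurd (List.mem_of_elem_eq_true hb) hmem
      have hsA : stepA (r, nfA) x = (r, nfA ++ [x]) := by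
        simp only [stepA, if_neg hlvl, hfr]
        rw [if_neg (by rw [hcontp]; exact Bool.false_ne_true)]
      have hsB : stepB (nxt, pl, nfA) x = (nxt, pl, nfA ++ [x]) := by
        simp only [stepB, if_pos hcount]
        rw [if_neg (fun hc => hmem ((hpl p).mp hc))]
      rw [hsA, hsB]
      obtain ⟨c1, c2, c3, c4, c5⟩ := ih r (nfA ++ [x]) nxt pl start hch hnd hpl hQnd'
        (fun y hy => hfresh y (List.mem_cons_of_mem _ hy))
        (fun y hy => hcnt y (List.mem_cons_of_mem _ hy))
      exact ⟨c1, c2, c3, c4, fun k hk => (c5 k hk).imp id (List.mem_cons_of_mem _)⟩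

lemma dropWhile_count_ne (S : List String)
    (hpair : S.Pairwise (fun a b => get_level a ≤ get_level b)) :
    ∀ x ∈ S.dropWhile (fun k => PySem.Str.count k "/" == 0), PySem.Str.count x "/" ≠ 0 := by
  induction S with
  | nil => intro x hx; simp at hx
  | cons a t ih =>
    rw [List.pairwise_cons] at hpair
    by_cases hpa : PySem.Str.count a "/" = 0
    · rw [List.dropWhile_cons_of_pos (by simpa [PySem.Str.count_eq] using hpa)]
      exact ih hpair.2
    · rw [List.dropWhile_cons_of_neg (by simpa [PySem.Str.count_eq] using hpa)]
      intro x hx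
      rcases List.mem_cons.mp hx with h1 | h2
      · exact h1 ▸ hpa
      · have hle := hpair.1 x h2
        simp only [get_level] at hle
        intro hx0
        rw [hx0] at hle
        simp at hle
        exact hpa hle

-- proof-side abbreviations for the pieces both ports compute
def sortedKeys (dic : List (String × Int)) : List String :=
  PySem.List.sorted (PySem.Dict.ofList dic).keys get_level

def S0of (dic : List (String × Int)) : List String :=
  (sortedKeys dic).takeWhile (fun k => PySem.Str.count k "/" == 0)

def S1of (dic : List (String × Int)) : List String :=
  (sortedKeys dic).dropWhile (fun k => PySem.Str.count k "/" == 0)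

def stAof (dic : List (String × Int)) : List String × List String :=
  (S1of dic).foldl stepA (S0of dic, [])

def nxt0of (dic : List (String × Int)) : PySem.Dict String (Option String) :=
  ((S0of dic).zip (S0of dic).tail).foldl (fun d pr => d.insert pr.1 (some pr.2)) PySem.Dict.empty

def stBof (dic : List (String × Int)) :
    PySem.Dict String (Option String) × PySem.Set String × List String :=
  (S1of dic).foldl stepB (nxt0of dic, PySem.Set.ofList (S0of dic), [])

lemma S0_count (dic : List (String × Int)) : ∀ x ∈ S0of dic, PySem.Str.count x "/" = 0 := by
  intro x hx
  have := List.mem_takeWhile_imp hx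
  simpa using this

lemma S1_count (dic : List (String × Int)) : ∀ x ∈ S1of dic, PySem.Str.count x "/" ≠ 0 :=
  dropWhile_count_ne (sortedKeys dic)
    (PySem.List.sorted_pairwise (PySem.Dict.ofList dic).keys get_level)

lemma split_S (dic : List (String × Int)) : S0of dic ++ S1of dic = sortedKeys dic :=
  List.takeWhile_append_dropWhile

lemma sortedKeys_nodup (dic : List (String × Int)) : (sortedKeys dic).Nodup :=
  ((PySem.List.sorted_perm (PySem.Dict.ofList dic).keys get_level false).nodup_iff).mpr
    (PySem.Dict.nodup_keys_ofList dic)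

lemma filter_eq_S0 (dic : List (String × Int)) :
    (sortedKeys dic).filter (fun k => PySem.Str.count k "/" == 0) = S0of dic := by
  rw [← split_S dic, List.filter_append]
  rw [List.filter_eq_self.mpr (fun x hx => by
    simpa [PySem.Str.count_eq] using S0_count dic x hx)]
  rw [List.filter_eq_nil_iff.mpr (fun x hx => by
    simpa [PySem.Str.count_eq] using S1_count dic x hx)]
  simp

lemma hA_eq (dic : List (String × Int)) :
    order_dic dic = (stAof dic).1 ++ (stAof dic).2 := by
  simp only [order_dic]
  rw [PySem.List.foldl_append_singleton (PySem.Dict.ofList dic).keys [], List.nil_append]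
  rw [show PySem.List.sorted (PySem.Dict.ofList dic).keys get_level = sortedKeys dic from rfl]
  rw [← split_S dic, List.foldl_append, foldl_stepA_zeros (S0of dic) (S0_count dic) ([], [])]
  rw [PySem.List.foldl_append_singleton]
  simp [stAof]

lemma hB_eq (dic : List (String × Int)) :
    order_dic_alt dic
      = walkChain (stBof dic).1 (sortedKeys dic).length (S0of dic).head? ++ (stBof dic).2.2 := by
  simp only [order_dic_alt]
  rw [show (fun k => (PySem.Str.count k "/" : Int)) = get_level from rfl]
  rw [show PySem.List.sorted (PySem.Dict.ofList dic).keys get_level = sortedKeys dic from rfl]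
  rw [filter_eq_S0 dic, PySem.List.slice_from_one]
  rw [show ((S0of dic).zip (S0of dic).tail).foldl
      (fun (d : PySem.Dict String (Option String)) pr => d.insert pr.1 (some pr.2))
      PySem.Dict.empty = nxt0of dic from rfl]
  rw [← split_S dic, List.foldl_append, foldl_stepB_zeros (S0of dic) (S0_count dic)]
  rw [show (S1of dic).foldl stepB (nxt0of dic, PySem.Set.ofList (S0of dic), []) = stBof dic from rfl]

-- ===== VERDICT (by name: the statement is the Claim_ definition above) =====
theorem order_dic_spec : Claim_equal_order_dic := by
  intro dic _
  show order_dic dic = order_dic_alt dic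
  rw [hA_eq dic, hB_eq dic]
  -- nodup facts for the split
  have hnd := sortedKeys_nodup dic
  rw [← split_S dic] at hnd
  obtain ⟨hnd0, hnd1, hdisj⟩ := List.nodup_append.mp hnd
  -- apply the loop invariant
  obtain ⟨c1, c2, c3, c4, c5⟩ := main_inv (S1of dic) (S0of dic) [] (nxt0of dic)
    (PySem.Set.ofList (S0of dic)) (S0of dic).head?
    (chain_nxt0 (S0of dic) hnd0) hnd0
    (fun k => by rw [PySem.Set.contains_iff, PySem.Set.mem_ofList])
    hnd1 (fun x hx hx0 => hdisj _ hx0 _ hx rfl) (S1_count dic)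
  -- the walk reproduces A's result list
  have hsub : (stAof dic).1 ⊆ sortedKeys dic := by
    intro k hk
    rw [← split_S dic]
    rcases c5 k hk with h1 | h2
    · exact List.mem_append_left _ h1
    · exact List.mem_append_right _ h2
  have hwalk : walkChain (stBof dic).1 (sortedKeys dic).length (S0of dic).head? = (stAof dic).1 :=
    walk_of_chain (stBof dic).1 (S0of dic).head? (stAof dic).1 c1 _
      ((List.subperm_of_subset c2 hsub).length_le)
  have c4' : (stAof dic).2 = (stBof dic).2.2 := c4
  rw [hwalk, c4']
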